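-- pv_equiv track=rewrite | github.com/ldydek/AGH-WDI | WDI/Set 6/ex.11.py | ex11
-- ===== SOURCE A (Python) =====
-- def ex11(T, k, n, index):
--     quantity = 0
--     if k == 1 and n == 0:
--         quantity = 1
--     for x in range(index, -1, -1):
--         if k % T[x] == 0:
--             quantity += ex11(T, k//T[x], n-1, x-1)
--     return quantity
-- ===== SOURCE B (Python) =====
-- def ex11(T, k, n, index):
--     # Bottom-up DP over prefixes of T: ways[(p, c)] = number of subsets of
--     # indices 0..x whose product is p (only products dividing k can still
--     # reach k, so others are never stored) and whose size is c.
--     if index < 0: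
--         return 1 if (k == 1 and n == 0) else 0
--     ways = {(1, 0): 1}
--     for x in range(index + 1):
--         t = T[x]
--         if k % t != 0:
--             continue
--         for (p, c), w in list(ways.items()):
--             q = p * t
--             if k % q == 0:
--                 ways[(q, c + 1)] = ways.get((q, c + 1), 0) + w
--     return ways.get((k, n), 0)
-- ===== Notes on version B (the rewrite author's own statement) =====
-- stated objective: alternative
-- what changed: Replaces A's top-down recursion over chains of divisors by a single bottom-up pass over T maintaining a dict from (product dividing k, factor count) to the number of index-subsets realising it, answering with ways.get((k,n),0).
import Mathlib
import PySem

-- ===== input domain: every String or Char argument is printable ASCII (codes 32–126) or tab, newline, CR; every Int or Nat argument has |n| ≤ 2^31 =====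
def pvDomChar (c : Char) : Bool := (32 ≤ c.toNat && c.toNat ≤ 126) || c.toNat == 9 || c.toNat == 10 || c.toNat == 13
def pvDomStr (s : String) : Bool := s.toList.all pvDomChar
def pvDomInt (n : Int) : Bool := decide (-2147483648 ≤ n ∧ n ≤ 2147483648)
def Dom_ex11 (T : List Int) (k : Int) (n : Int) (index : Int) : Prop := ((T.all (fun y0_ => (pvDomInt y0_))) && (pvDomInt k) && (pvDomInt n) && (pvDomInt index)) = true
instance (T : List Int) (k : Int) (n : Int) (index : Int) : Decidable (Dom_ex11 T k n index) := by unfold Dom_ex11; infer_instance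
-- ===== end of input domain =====

-- B replaces A's top-down recursion by a single bottom-up dict DP pass over prefixes of T
-- (states = (product dividing k, subset size)); return values agree on every input of Pre_.

-- ===== PORT A =====
-- A's recursion, fuel = index + 1 (the loop 'for x in range(index, -1, -1)' runs x = fuel-1 .. 0);
-- ex11Loop is the for-loop with accumulator acc (= quantity), ex11Go one call of the Python ex11.
mutual
def ex11Go (T : List Int) (k : Int) (n : Int) (fuel : Nat) : Int :=
  ex11Loop T k n (if k = 1 ∧ n = 0 then 1 else 0) fuel
termination_by 2 * fuel + 1

def ex11Loop (T : List Int) (k : Int) (n : Int) (acc : Int) (fuel : Nat) : Int :=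
  match fuel with
  | 0 => acc
  | x + 1 =>
    let t := T.getD x 0   -- T[x]; in range on every input admitted by Pre_
    if PySem.Int.mod k t = 0 then
      ex11Loop T k n (acc + ex11Go T (PySem.Int.floordiv k t) (n - 1) x) x
    else
      ex11Loop T k n acc x
termination_by 2 * fuel
end

def ex11 (T : List Int) (k : Int) (n : Int) (index : Int) : Int :=
  ex11Go T k n (index + 1).toNat

-- ===== PORT B =====
-- one pass of B's inner loop: fold over ways.items() inserting into new (initialised to dict(ways))
def ex11AltStep (k : Int) (t : Int) (ways : PySem.Dict (Int × Int) Int) : PySem.Dict (Int × Int) Int :=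
  ways.items.foldl
    (fun new e =>
      let q := e.1.1 * t
      if PySem.Int.mod k q = 0 then
        new.insert (q, e.1.2 + 1) (new.getD (q, e.1.2 + 1) 0 + e.2)
      else new)
    ways

-- the dict 'ways' after processing T[0..m-1]; an element not dividing k is skipped ('continue')
def ex11AltDP (T : List Int) (k : Int) : Nat → PySem.Dict (Int × Int) Int
  | 0 => PySem.Dict.empty.insert (1, 0) 1
  | m + 1 =>
    let t := T.getD m 0
    if PySem.Int.mod k t ≠ 0 then ex11AltDP T k m
    else ex11AltStep k t (ex11AltDP T k m)

def ex11_alt (T : List Int) (k : Int) (n : Int) (index : Int) : Int :=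
  if index < 0 then (if k = 1 ∧ n = 0 then 1 else 0)
  else (ex11AltDP T k (index.toNat + 1)).getD (k, n) 0

-- ===== PRECONDITION & SPEC =====
-- Pre_ excludes exactly the inputs where A raises: index ≥ len(T) (IndexError at T[index])
-- and a zero among T[0..index] (ZeroDivisionError at k % T[x]).
def Pre_ex11 (T : List Int) (k : Int) (n : Int) (index : Int) : Prop :=
  index < (T.length : Int) ∧ ∀ t ∈ T.take (index + 1).toNat, t ≠ 0
instance (T : List Int) (k : Int) (n : Int) (index : Int) : Decidable (Pre_ex11 T k n index) := by
  unfold Pre_ex11; infer_instance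

def pvWitness_ex11 : List Int × Int × Int × Int := ([2, 3, 6], 6, 2, 2)

def Spec_ex11 (T : List Int) (k : Int) (n : Int) (index : Int) (out : Int) : Prop := out = ex11_alt T k n index
instance (T : List Int) (k : Int) (n : Int) (index : Int) (out : Int) : Decidable (Spec_ex11 T k n index out) := by unfold Spec_ex11; infer_instance

-- ===== CLAIM (what is proved, stated in full; the proofs are below) =====
def Claim_equal_ex11 : Prop := ∀ (T : List Int) (k : Int) (n : Int) (index : Int), Dom_ex11 T k n index → Pre_ex11 T k n index → Spec_ex11 T k n index (ex11 T k n index)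

-- ===== LEMMAS AND PROOFS =====

-- the for-loop only adds to its accumulator
lemma ex11Loop_acc (T : List Int) (k n : Int) (fuel : Nat) :
    ∀ acc : Int, ex11Loop T k n acc fuel = acc + ex11Loop T k n 0 fuel := by
  induction fuel with
  | zero => intro acc; simp [ex11Loop]
  | succ x ih =>
    intro acc
    rw [ex11Loop, ex11Loop]
    by_cases h : PySem.Int.mod k (T.getD x 0) = 0
    · simp only [h, if_true]
      rw [ih, ih (0 + _)]
      ring
    · simp only [if_neg h]
      rw [ih, ih 0]

-- A's recurrence: one more available index m adds the "use T[m]" branch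
lemma ex11Go_succ (T : List Int) (k n : Int) (m : Nat) :
    ex11Go T k n (m + 1) =
      (if PySem.Int.mod k (T.getD m 0) = 0 then
        ex11Go T (PySem.Int.floordiv k (T.getD m 0)) (n - 1) m else 0) + ex11Go T k n m := by
  by_cases h : PySem.Int.mod k (T.getD m 0) = 0
  · rw [if_pos h]
    conv_lhs => rw [ex11Go, ex11Loop]
    simp only [if_pos h]
    rw [ex11Loop_acc]
    rw [show ex11Go T k n m = ex11Loop T k n (if k = 1 ∧ n = 0 then 1 else 0) m from by rw [ex11Go]]
    rw [ex11Loop_acc T k n m (if k = 1 ∧ n = 0 then 1 else 0)]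
    ring
  · rw [if_neg h]
    conv_lhs => rw [ex11Go, ex11Loop]
    simp only [if_neg h]
    conv_rhs => rw [ex11Go]
    ring

-- sum of (value at key κ) over an association list with distinct keys = getD κ 0
lemma sum_items_getD (l : List ((Int × Int) × Int)) (κ : Int × Int)
    (hnd : (l.map (·.1)).Nodup) :
    (l.map (fun e => if e.1 = κ then e.2 else 0)).sum = (PySem.Dict.mk l).getD κ 0 := by
  induction l with
  | nil => simp [PySem.Dict.getD, PySem.Dict.get?]
  | cons e rest ih =>
    simp only [List.map_cons, List.nodup_cons] at hnd
    rw [List.map_cons, List.sum_cons,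
        PySem.Dict.getD_eq_get?_getD, PySem.Dict.get?_mk_cons]
    by_cases h : e.1 = κ
    · rw [if_pos h, if_pos (by simpa using h)]
      have hz : (rest.map (fun e => if e.1 = κ then e.2 else 0)).sum = 0 := by
        apply List.sum_eq_zero
        intro z hz
        simp only [List.mem_map] at hz
        obtain ⟨e', he', hez⟩ := hz
        have : e'.1 ≠ κ := by
          intro hk; exact hnd.1 (h ▸ hk ▸ List.mem_map_of_mem he')
        rw [if_neg this] at hez; omega
      simp [hz]
    · rw [if_neg h, if_neg (by simpa using h), ← PySem.Dict.getD_eq_get?_getD,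
          ← ih hnd.2]
      simp
  
-- the contribution of B's inner loop to a target key
def contribSum (k t : Int) (tgt : Int × Int) (L : List ((Int × Int) × Int)) : Int :=
  (L.map (fun e =>
    if PySem.Int.mod k (e.1.1 * t) = 0 ∧ (e.1.1 * t, e.1.2 + 1) = tgt then e.2 else 0)).sum

lemma foldl_step_getD (k t : Int) (tgt : Int × Int) :
    ∀ (L : List ((Int × Int) × Int)) (new : PySem.Dict (Int × Int) Int),
      (L.foldl
        (fun new e =>
          let q := e.1.1 * t
          if PySem.Int.mod k q = 0 then
            new.insert (q, e.1.2 + 1) (new.getD (q, e.1.2 + 1) 0 + e.2)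
          else new)
        new).getD tgt 0 = new.getD tgt 0 + contribSum k t tgt L := by
  intro L
  induction L with
  | nil => intro new; simp [contribSum]
  | cons e rest ih =>
    intro new
    rw [List.foldl_cons, ih]
    simp only [contribSum, List.map_cons, List.sum_cons]
    by_cases h : PySem.Int.mod k (e.1.1 * t) = 0
    · simp only [h, ↓reduceIte, true_and]
      by_cases htgt : (e.1.1 * t, e.1.2 + 1) = tgt
      · rw [if_pos htgt, htgt, PySem.Dict.getD_insert, if_pos rfl]; ring
      · rw [if_neg htgt, PySem.Dict.getD_insert, if_neg (fun hh => htgt hh.symm)]; ring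
    · simp [h]

-- key uniqueness is preserved through B's inner loop
lemma nodup_keys_step (k t : Int) :
    ∀ (L : List ((Int × Int) × Int)) (new : PySem.Dict (Int × Int) Int),
      new.keys.Nodup →
      ((L.foldl
        (fun new e =>
          let q := e.1.1 * t
          if PySem.Int.mod k q = 0 then
            new.insert (q, e.1.2 + 1) (new.getD (q, e.1.2 + 1) 0 + e.2)
          else new)
        new).keys).Nodup := by
  intro L
  induction L with
  | nil => intro new h; simpa using h
  | cons e rest ih =>
    intro new h
    rw [List.foldl_cons]
    apply ih
    by_cases hc : PySem.Int.mod k (e.1.1 * t) = 0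
    · simp only [hc, if_true]
      exact PySem.Dict.nodup_keys_insert _ _ _ h
    · simpa [hc] using h

lemma nodup_keys_DP (T : List Int) (k : Int) (m : Nat) :
    (ex11AltDP T k m).keys.Nodup := by
  induction m with
  | zero =>
    rw [ex11AltDP]
    exact PySem.Dict.nodup_keys_insert _ _ _ (by simp [PySem.Dict.empty, PySem.Dict.keys])
  | succ m ih =>
    rw [ex11AltDP]
    split_ifs with hk
    · exact ih
    · rw [ex11AltStep]
      exact nodup_keys_step _ _ _ _ ih

-- contribSum over the items of a nodup dict, for a target (r, d) with r ∣ k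
lemma contribSum_items (k t : Int) (ht : t ≠ 0) (r d : Int) (hrk : r ∣ k)
    (W : PySem.Dict (Int × Int) Int) (hnd : W.keys.Nodup) :
    contribSum k t (r, d) W.items =
      if h : t ∣ r then W.getD (r / t, d - 1) 0 else 0 := by
  by_cases h : t ∣ r
  · rw [dif_pos h]
    obtain ⟨p₀, hp⟩ := h
    have hp₀ : r / t = p₀ := by rw [hp]; exact Int.mul_ediv_cancel_left _ ht
    rw [hp₀]
    have : contribSum k t (r, d) W.items =
        (W.items.map (fun e => if e.1 = (p₀, d - 1) then e.2 else 0)).sum := by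
      unfold contribSum
      congr 1
      apply List.map_congr_left
      intro e _
      by_cases he : e.1 = (p₀, d - 1)
      · rw [if_pos he, if_pos]
        constructor
        · rw [(PySem.Int.mod_eq_zero_iff_dvd _ _), show e.1.1 * t = r by
            rw [he]; simp [hp, mul_comm]]
          exact hrk
        · rw [he]; simp [hp, mul_comm]
      · rw [if_neg he, if_neg]
        intro ⟨_, h2⟩
        apply he
        have h1 : e.1.1 * t = r := (Prod.mk.injEq _ _ _ _).mp h2 |>.1
        have h2' : e.1.2 + 1 = d := (Prod.mk.injEq _ _ _ _).mp h2 |>.2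
        have : e.1.1 = p₀ := by
          have : e.1.1 * t = p₀ * t := by rw [h1, hp]; ring
          exact mul_right_cancel₀ ht this
        exact Prod.ext this (by omega)
    rw [this, sum_items_getD _ _ (by simpa [PySem.Dict.keys] using hnd)]
  · rw [dif_neg h]
    apply List.sum_eq_zero
    intro z hz
    simp only [List.mem_map] at hz
    obtain ⟨e, _, hez⟩ := hz
    rw [if_neg] at hez
    · omega
    · intro ⟨_, h2⟩
      have h1 : e.1.1 * t = r := (Prod.mk.injEq _ _ _ _).mp h2 |>.1
      exact h ⟨e.1.1, by rw [← h1]; ring⟩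

-- main invariant: B's dict after m steps tabulates A's recursion for every product dividing k
lemma DP_inv (T : List Int) (k : Int) :
    ∀ m : Nat, (∀ i : Nat, i < m → T.getD i 0 ≠ 0) →
    ∀ r d : Int, r ∣ k → (ex11AltDP T k m).getD (r, d) 0 = ex11Go T r d m := by
  intro m
  induction m with
  | zero =>
    intro _ r d _
    rw [ex11AltDP, ex11Go, ex11Loop, PySem.Dict.getD_insert]
    by_cases h : (r, d) = ((1 : Int), (0 : Int))
    · rw [if_pos h, if_pos (by simpa [Prod.ext_iff] using h)]
    · rw [if_neg h, if_neg (by simpa [Prod.ext_iff] using h), PySem.Dict.getD_empty]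
  | succ m ih =>
    intro hT r d hrk
    have ht : T.getD m 0 ≠ 0 := hT m (by omega)
    have ihm := ih (fun i hi => hT i (by omega))
    rw [ex11AltDP]
    split_ifs with hk
    · -- element skipped: T[m] does not divide k, hence divides no divisor r of k
      rw [ihm r d hrk, ex11Go_succ, if_neg, zero_add]
      intro hrt
      exact hk ((PySem.Int.mod_eq_zero_iff_dvd _ _).mpr
        (dvd_trans ((PySem.Int.mod_eq_zero_iff_dvd _ _).mp hrt) hrk))
    · rw [ex11AltStep, foldl_step_getD,
          contribSum_items k (T.getD m 0) ht r d hrk _ (nodup_keys_DP T k m),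
          ex11Go_succ, ihm r d hrk]
      by_cases h : T.getD m 0 ∣ r
      · rw [dif_pos h, if_pos ((PySem.Int.mod_eq_zero_iff_dvd _ _).mpr h)]
        obtain ⟨p₀, hp⟩ := h
        have hdiv : PySem.Int.floordiv r (T.getD m 0) = p₀ := by
          have hmod : PySem.Int.mod r (T.getD m 0) = 0 :=
            (PySem.Int.mod_eq_zero_iff_dvd _ _).mpr ⟨p₀, hp⟩
          have := PySem.Int.floordiv_mul_add_mod r (T.getD m 0)
          rw [hmod, add_zero] at this
          exact mul_right_cancel₀ ht (by rw [this, hp]; ring)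
        have hediv : r / T.getD m 0 = p₀ := by rw [hp]; exact Int.mul_ediv_cancel_left _ ht
        rw [hdiv, hediv, ihm p₀ (d - 1) (dvd_trans ⟨T.getD m 0, by rw [hp]; ring⟩ hrk)]
        ring
      · rw [dif_neg h, if_neg (fun hc => h ((PySem.Int.mod_eq_zero_iff_dvd _ _).mp hc))]
        ring

-- ===== VERDICT (by name: the statement is the Claim_ definition above) =====
theorem ex11_spec : Claim_equal_ex11 := by
  intro T k n index _ hPre
  unfold Spec_ex11 ex11 ex11_alt
  by_cases hneg : index < 0
  · rw [if_pos hneg, show (index + 1).toNat = 0 by omega, ex11Go, ex11Loop]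
  · rw [if_neg hneg]
    have hfuel : (index + 1).toNat = index.toNat + 1 := by omega
    rw [hfuel]
    refine (DP_inv T k (index.toNat + 1) ?_ k n dvd_rfl).symm
    intro i hi
    have hil : i < T.length := by
      have := hPre.1; omega
    have : T.getD i 0 = T[i] := List.getD_eq_getElem T 0 hil
    rw [this]
    apply hPre.2
    have hmem : (T.take (index + 1).toNat)[i]'(by simp [hfuel]; omega) = T[i] :=
      List.getElem_take
    exact hmem ▸ List.getElem_mem _
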